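-- pv_equiv track=rewrite | github.com/delfinaronco/algoritmos-1 | Guia7.py | filas_ordenadas
-- ===== SOURCE A (Python) =====
-- def ordenados(l) -> bool:
--     for i in range (len(l)-1):
--         if not (l[i] < l[i+1]):
--             return False
--     return True
--
-- def filas_ordenadas (matriz: list) -> list:
--     res: list[bool] = []
--     for fila in matriz:
--         if ordenados(fila) == True:
--             res.append(True)
--         else:
--             res.append(False)
--     return res
-- ===== SOURCE B (Python) =====
-- def filas_ordenadas(matriz: list) -> list:
--     # a row is strictly increasing iff it equals its sorted copy and has no duplicates
--     return [list(fila) == sorted(fila) and len(set(fila)) == len(fila) for fila in matriz]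
-- ===== Notes on version B (the rewrite author's own statement) =====
-- stated objective: alternative
-- what changed: Replaces the index loop over adjacent pairs with a sort-then-compare plus distinctness check (row == sorted(row) and len(set(row)) == len(row)), collected by a comprehension.
import Mathlib
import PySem

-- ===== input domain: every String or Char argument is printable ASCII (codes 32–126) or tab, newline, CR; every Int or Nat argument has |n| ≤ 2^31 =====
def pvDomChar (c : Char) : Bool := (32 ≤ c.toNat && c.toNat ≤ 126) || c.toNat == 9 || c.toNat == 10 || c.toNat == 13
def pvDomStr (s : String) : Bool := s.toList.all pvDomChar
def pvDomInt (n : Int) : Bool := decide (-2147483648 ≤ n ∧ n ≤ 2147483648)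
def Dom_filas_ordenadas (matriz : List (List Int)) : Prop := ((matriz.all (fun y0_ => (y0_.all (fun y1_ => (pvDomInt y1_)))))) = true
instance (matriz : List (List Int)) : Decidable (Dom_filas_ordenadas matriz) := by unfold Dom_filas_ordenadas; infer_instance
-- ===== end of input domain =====

-- B replaces A's adjacent-pair index scan by "row equals its sorted copy and is duplicate-free" (alternative decomposition, not faster).

-- ===== PORT A =====
-- 'for i in range(len(l)-1): if not (l[i] < l[i+1]): return False' — early return modelled by the Bool recursion
def ordenadosLoop (l : List Int) : List Int → Bool
  | [] => true
  | i :: rest =>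
      if !(PySem.List.pyGetD l i 0 < PySem.List.pyGetD l (i + 1) 0) then false
      else ordenadosLoop l rest

def ordenados (l : List Int) : Bool :=
  ordenadosLoop l (PySem.List.pyRange 0 ((l.length : Int) - 1))

def filas_ordenadas (matriz : List (List Int)) : List Bool :=
  matriz.foldl (fun res fila => res ++ [if ordenados fila = true then true else false]) []

-- ===== PORT B =====
-- 'list(fila) == sorted(fila) and len(set(fila)) == len(fila)'
def filaCheck (fila : List Int) : Bool :=
  decide (fila = PySem.List.sorted fila (fun x => x)) &&
    ((PySem.Set.ofList fila).length == fila.length)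

def filas_ordenadas_alt (matriz : List (List Int)) : List Bool :=
  matriz.map filaCheck

-- ===== PRECONDITION & SPEC =====
def Spec_filas_ordenadas (matriz : List (List Int)) (out : List Bool) : Prop := out = filas_ordenadas_alt matriz
instance (matriz : List (List Int)) (out : List Bool) : Decidable (Spec_filas_ordenadas matriz out) := by unfold Spec_filas_ordenadas; infer_instance

-- ===== CLAIM (what is proved, stated in full; the proofs are below) =====
def Claim_equal_filas_ordenadas : Prop := ∀ (matriz : List (List Int)), Dom_filas_ordenadas matriz → Spec_filas_ordenadas matriz (filas_ordenadas matriz)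

-- ===== LEMMAS AND PROOFS =====

-- the early-return loop checks exactly every index of the list it is fed
theorem ordenadosLoop_eq_all (l : List Int) (is : List Int) :
    ordenadosLoop l is =
      is.all (fun i => PySem.List.pyGetD l i 0 < PySem.List.pyGetD l (i + 1) 0) := by
  induction is with
  | nil => rfl
  | cons i rest ih =>
      simp only [ordenadosLoop, List.all_cons, ih]
      by_cases h : PySem.List.pyGetD l i 0 < PySem.List.pyGetD l (i + 1) 0 <;> simp [h]

theorem ordenados_iff_pairwise (l : List Int) :
    ordenados l = true ↔ l.Pairwise (· < ·) := by
  rw [← List.isChain_iff_pairwise, List.isChain_iff_getElem]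
  rw [ordenados, ordenadosLoop_eq_all, List.all_eq_true]
  constructor
  · intro h i hi
    have hm : (i : Int) ∈ PySem.List.pyRange 0 ((l.length : Int) - 1) := by
      rw [PySem.List.mem_pyRange_one]; omega
    have := h _ hm
    rw [PySem.List.pyGetD_eq_getElem l 0 (by omega) (by omega),
        PySem.List.pyGetD_eq_getElem l 0 (by omega) (by omega)] at this
    simp only [decide_eq_true_eq] at this
    have e1 : (i : Int).toNat = i := by omega
    have e2 : ((i : Int) + 1).toNat = i + 1 := by omega
    simpa [e1, e2] using this
  · intro h i hm
    rw [PySem.List.mem_pyRange_one] at hm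
    have hi : i.toNat + 1 < l.length := by omega
    have := h i.toNat hi
    rw [PySem.List.pyGetD_eq_getElem l 0 (by omega) (by omega),
        PySem.List.pyGetD_eq_getElem l 0 (by omega) (by omega)]
    have e2 : (i + 1).toNat = i.toNat + 1 := by omega
    simpa [e2] using this

-- set(xs) (first occurrences in order) is a sublist of xs
theorem ofList_sublist (xs : List Int) : (PySem.Set.ofList xs).Sublist xs := by
  induction xs using List.reverseRecOn with
  | nil => simp [PySem.Set.ofList]
  | append_singleton ys y ih =>
      rw [PySem.Set.ofList_append_singleton, PySem.Set.add_eq_ite]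
      split
      · exact ih.trans (List.sublist_append_left ys [y])
      · exact ih.append_right [y]

theorem filaCheck_iff_pairwise (l : List Int) :
    filaCheck l = true ↔ l.Pairwise (· < ·) := by
  rw [filaCheck, Bool.and_eq_true, decide_eq_true_eq, beq_iff_eq]
  constructor
  · rintro ⟨hs, hn⟩
    have hnd : l.Nodup := by
      have := (ofList_sublist l).eq_of_length hn
      rw [← this]; exact PySem.Set.nodup_ofList l
    have hle : l.Pairwise (fun a b => a ≤ b) := by
      have := PySem.List.sorted_pairwise l (fun x => x)
      rwa [← hs] at this
    have := hle.and hnd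
    exact this.imp (fun h => lt_of_le_of_ne h.1 h.2)
  · intro h
    refine ⟨(PySem.List.sorted_eq_of_perm_of_pairwise_lt l l (fun x => x) (List.Perm.refl l) h).symm, ?_⟩
    have hnd : l.Nodup := h.imp ne_of_lt
    rw [PySem.Set.ofList_eq_self_of_nodup l hnd]

theorem ordenados_eq_filaCheck (l : List Int) : ordenados l = filaCheck l := by
  rcases Bool.eq_false_or_eq_true (filaCheck l) with h | h <;> rw [h]
  · rw [ordenados_iff_pairwise, ← filaCheck_iff_pairwise, h]
  · rw [← Bool.not_eq_true, ordenados_iff_pairwise, ← filaCheck_iff_pairwise, h]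
    simp

-- ===== VERDICT (by name: the statement is the Claim_ definition above) =====
theorem filas_ordenadas_spec : Claim_equal_filas_ordenadas := by
  intro matriz _
  show filas_ordenadas matriz = filas_ordenadas_alt matriz
  rw [filas_ordenadas, filas_ordenadas_alt,
      PySem.List.foldl_append_singleton_eq_map
        (fun fila => if ordenados fila = true then true else false) matriz []]
  simp only [List.nil_append]
  exact List.map_congr_left fun fila _ => by
    rw [ordenados_eq_filaCheck]
    cases filaCheck fila <;> rfl
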